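-- pv_equiv track=rewrite | github.com/CarpeVida/bme160 | lab06/findUnique.py | get_biggs
-- ===== SOURCE A (Python) =====
-- def get_biggs(uniqueSubSeqList, originalSeq):
--     """
--     get_biggs appends list with extensions forward of each subseq
--     then appends list extensions in rev of each subseq
--     it returns a list of all
--     """
--     allBigs = set()
--
--     for eachUniqueSub in uniqueSubSeqList:
--         bigs = set()
--         startPos = originalSeq.find(eachUniqueSub)
--         stopPos = startPos + len(eachUniqueSub)
--         for i in range(0,startPos+1):
--             for j in range(stopPos, len(originalSeq)+1):
--                 bigs.add(originalSeq[i:j])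
--         try:
--             bigs.remove(str(eachUniqueSub))
--         except KeyError:
--             pass
--         allBigs = allBigs | bigs
--     return allBigs
-- ===== SOURCE B (Python) =====
-- def get_biggs(uniqueSubSeqList, originalSeq):
--     """Single flattened candidate stream: grow each extension character by
--     character (no repeated slicing, no per-subseq sets), filter the subseq
--     itself on the fly, and deduplicate once at the end."""
--     n = len(originalSeq)
--     out = []
--     for sub in uniqueSubSeqList:
--         startPos = originalSeq.find(sub)
--         if startPos < 0:
--             continue
--         stopPos = startPos + len(sub)
--         # left extensions s[i:startPos], built right-to-left by prepending chars
--         lefts = ['']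
--         for k in reversed(range(startPos)):
--             lefts = [originalSeq[k] + lefts[0]] + lefts
--         for left in lefts:
--             t = left + sub
--             if t != sub:
--                 out.append(t)
--             for k in range(stopPos, n):
--                 t = t + originalSeq[k]
--                 if t != sub:
--                     out.append(t)
--     return set(out)
-- ===== Notes on version B (the rewrite author's own statement) =====
-- stated objective: alternative
-- what changed: A builds a per-subseq set of slices originalSeq[i:j] in nested loops, set-removes the subseq and unions sets; B emits one flat candidate stream, growing each extension character by character (prepending for left extensions, appending in place for right ones), filters the subseq on the fly, and deduplicates once with a single final set().
import Mathlib
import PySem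

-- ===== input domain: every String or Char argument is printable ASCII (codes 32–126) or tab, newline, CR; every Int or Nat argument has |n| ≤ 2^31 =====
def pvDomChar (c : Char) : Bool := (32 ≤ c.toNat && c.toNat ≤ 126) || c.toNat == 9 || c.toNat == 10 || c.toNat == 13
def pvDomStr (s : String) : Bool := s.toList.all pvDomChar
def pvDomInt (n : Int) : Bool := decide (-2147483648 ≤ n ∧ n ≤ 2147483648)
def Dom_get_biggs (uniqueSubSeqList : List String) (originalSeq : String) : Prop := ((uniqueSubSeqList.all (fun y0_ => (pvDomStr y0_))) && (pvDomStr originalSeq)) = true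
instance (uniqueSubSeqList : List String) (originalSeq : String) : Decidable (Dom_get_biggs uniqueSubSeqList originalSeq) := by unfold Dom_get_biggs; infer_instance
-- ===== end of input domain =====

-- B replaces A's per-subseq sets of slices by one flattened candidate stream built by
-- character-by-character growth, filtered on the fly and deduplicated once at the end
-- (alternative decomposition, same complexity).


-- ===== PORT A =====
-- literal transliteration of A: nested i/j loops adding originalSeq[i:j] to a per-sub set,
-- try-remove (= discard), union into allBigs
def get_biggs (uniqueSubSeqList : List String) (originalSeq : String) : List String :=
  uniqueSubSeqList.foldl (fun allBigs eachUniqueSub =>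
    let startPos : Int := PySem.Str.find originalSeq eachUniqueSub
    let stopPos : Int := startPos + PySem.Str.len eachUniqueSub
    let bigs : PySem.Set String :=
      (PySem.List.pyRange 0 (startPos + 1)).foldl (fun bigs i =>
        (PySem.List.pyRange stopPos (PySem.Str.len originalSeq + 1)).foldl (fun bigs j =>
          PySem.Set.add bigs (PySem.Str.slice originalSeq (some i) (some j))) bigs)
        PySem.Set.empty
    -- try: bigs.remove(str(eachUniqueSub)) except KeyError: pass  ==  discard
    let bigs := PySem.Set.discard bigs eachUniqueSub
    PySem.Set.union allBigs bigs)
    PySem.Set.empty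

-- ===== PORT B =====
-- literal transliteration of B: one flat output stream, left extensions built by prepending
-- characters, right extensions grown in place character by character, one final set(out).
-- originalSeq[k] on an in-range k is ported as the one-char slice originalSeq[k:k+1] (exact
-- here: 0 ≤ k < len); lefts[0] is ported as headD "" (exact: lefts is never empty).
def get_biggs_alt (uniqueSubSeqList : List String) (originalSeq : String) : List String :=
  let n : Int := PySem.Str.len originalSeq
  let out : List String :=
    uniqueSubSeqList.foldl (fun out sub =>
      let startPos : Int := PySem.Str.find originalSeq sub
      if startPos < 0 then out
      else
        let stopPos : Int := startPos + PySem.Str.len sub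
        let lefts : List String :=
          (PySem.List.pyRange 0 startPos).reverse.foldl
            (fun lefts k =>
              (PySem.Str.slice originalSeq (some k) (some (k+1)) ++ lefts.headD "") :: lefts)
            [""]
        lefts.foldl (fun out left =>
          let t := left ++ sub
          let out := if t = sub then out else out ++ [t]
          ((PySem.List.pyRange stopPos n).foldl
            (fun st k =>
              let t := st.1 ++ PySem.Str.slice originalSeq (some k) (some (k+1))
              (t, if t = sub then st.2 else st.2 ++ [t]))
            (t, out)).2) out)
      []
  PySem.Set.ofList out

-- ===== PRECONDITION & SPEC =====
def Spec_get_biggs (uniqueSubSeqList : List String) (originalSeq : String) (out : List String) : Prop := out = get_biggs_alt uniqueSubSeqList originalSeq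
instance (uniqueSubSeqList : List String) (originalSeq : String) (out : List String) : Decidable (Spec_get_biggs uniqueSubSeqList originalSeq out) := by unfold Spec_get_biggs; infer_instance

-- ===== CLAIM (what is proved, stated in full; the proofs are below) =====
def Claim_equal_get_biggs : Prop := ∀ (uniqueSubSeqList : List String) (originalSeq : String), Dom_get_biggs uniqueSubSeqList originalSeq → Spec_get_biggs uniqueSubSeqList originalSeq (get_biggs uniqueSubSeqList originalSeq)

-- ===== LEMMAS AND PROOFS =====

-- the unфiltered candidate list of one sub: all slices spanning [st, sp), i ascending then j
def candList (os : String) (st sp : Int) : List String :=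
  (PySem.List.pyRange 0 (st + 1)).flatMap (fun i =>
    (PySem.List.pyRange sp (PySem.Str.len os + 1)).map (fun j =>
      PySem.Str.slice os (some i) (some j)))

-- one sub's net contribution (shared normal form of both sides)
def contrib (os sub : String) : List String :=
  (candList os (PySem.Str.find os sub) (PySem.Str.find os sub + PySem.Str.len sub)).filter
    (fun t => !(t == sub))

-- splitting a take/drop slice at two interior points, on lists
theorem take_drop_split3 {α : Type} (xs : List α) (i a b j : Nat)
    (h1 : i ≤ a) (h2 : a ≤ b) (h3 : b ≤ j) :
    List.take (a - i) (List.drop i xs) ++ List.take (b - a) (List.drop a xs)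
      ++ List.take (j - b) (List.drop b xs)
    = List.take (j - i) (List.drop i xs) := by
  have h4 : List.drop a xs = List.drop (a - i) (List.drop i xs) := by
    rw [List.drop_drop]; congr 1; omega
  have h5 : List.drop b xs = List.drop (b - a) (List.drop a xs) := by
    rw [List.drop_drop]; congr 1; omega
  rw [show j - i = (a - i) + ((b - a) + (j - b)) by omega, List.take_add, List.take_add,
      ← h4, ← h5, List.append_assoc]

-- a Python slice s[i:j] splits at two interior points a ≤ b
theorem slice_split3 (s : String) (i a b j : Int)
    (h0 : 0 ≤ i) (h1 : i ≤ a) (h2 : a ≤ b) (h3 : b ≤ j) :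
    PySem.Str.slice s (some i) (some a) ++ PySem.Str.slice s (some a) (some b)
      ++ PySem.Str.slice s (some b) (some j)
    = PySem.Str.slice s (some i) (some j) := by
  apply String.ext
  simp only [String.toList_append, PySem.Str.toList_slice, PySem.Chars.slice_eq_listSlice]
  rw [PySem.List.slice_toNat _ h0 (by omega), PySem.List.slice_toNat _ (by omega : (0:Int) ≤ a) (by omega),
      PySem.List.slice_toNat _ (by omega : (0:Int) ≤ b) (by omega), PySem.List.slice_toNat _ h0 (by omega)]
  exact take_drop_split3 _ _ _ _ _ (by omega) (by omega) (by omega)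

theorem slice_refl_empty (s : String) (a : Int) (h : 0 ≤ a) :
    PySem.Str.slice s (some a) (some a) = "" := by
  apply String.ext
  simp only [PySem.Str.toList_slice, PySem.Chars.slice_eq_listSlice,
    PySem.List.slice_toNat _ h h]
  simp

-- two-point split: s[i:a] ++ s[a:j] = s[i:j]
theorem slice_split2 (s : String) (i a j : Int)
    (h0 : 0 ≤ i) (h1 : i ≤ a) (h2 : a ≤ j) :
    PySem.Str.slice s (some i) (some a) ++ PySem.Str.slice s (some a) (some j)
    = PySem.Str.slice s (some i) (some j) := by
  have := slice_split3 s i a j j h0 h1 h2 le_rfl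
  rwa [slice_refl_empty s j (by omega), String.append_empty] at this

theorem discard_eq {α : Type} [BEq α] (s : PySem.Set α) (x : α) :
    PySem.Set.discard s x = List.filter (fun y => !(y == x)) s := rfl

-- dedup commutes with filtering
theorem ofList_filter {α : Type} [BEq α] [LawfulBEq α] (p : α → Bool) (L : List α) :
    List.filter p (PySem.Set.ofList L) = PySem.Set.ofList (L.filter p) := by
  induction L with
  | nil => simp [PySem.Set.ofList_nil]
  | cons a L ih =>
    rw [PySem.Set.ofList_cons, List.filter_cons]
    by_cases hp : p a = true
    · rw [if_pos hp, List.filter_cons, if_pos hp, PySem.Set.ofList_cons, ← ih]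
      congr 1
      rw [discard_eq, discard_eq, List.filter_filter, List.filter_filter]
      congr 1
      funext y
      rw [Bool.and_comm]
    · rw [if_neg hp, List.filter_cons, if_neg hp, ← ih]
      rw [discard_eq, List.filter_filter]
      apply List.filter_congr
      intro y _
      by_cases hy : y = a
      · subst hy; simp_all
      · simp [hy]

-- update by a deduped list = update by the raw list
theorem update_ofList {α : Type} [BEq α] [LawfulBEq α] (s : PySem.Set α) (xs : List α) :
    PySem.Set.update s (PySem.Set.ofList xs) = PySem.Set.update s xs := by
  rw [PySem.Set.update_eq_append_filter, PySem.Set.update_eq_append_filter,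
      PySem.Set.ofList_ofList]

-- the bridge: unioning "dedup then discard x" = appending the raw x-filtered stream
theorem update_discard_ofList {α : Type} [BEq α] [LawfulBEq α]
    (acc : PySem.Set α) (L : List α) (x : α) :
    PySem.Set.update acc (PySem.Set.discard (PySem.Set.ofList L) x)
    = PySem.Set.update acc (L.filter (fun t => !(t == x))) := by
  have h : PySem.Set.discard (PySem.Set.ofList L) x
      = PySem.Set.ofList (L.filter (fun t => !(t == x))) := by
    show List.filter _ (PySem.Set.ofList L) = _
    exact ofList_filter _ L
  rw [h, update_ofList]

-- a doubly nested add-loop is an update by the flatMap of the generated values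
theorem foldl_add_nested {α β γ : Type} [BEq γ] (xs : List α) (g : α → List β)
    (f : α → β → γ) (init : PySem.Set γ) :
    xs.foldl (fun s a => (g a).foldl (fun s b => PySem.Set.add s (f a b)) s) init
    = PySem.Set.update init (xs.flatMap fun a => (g a).map (f a)) := by
  induction xs generalizing init with
  | nil => rfl
  | cons a xs ih =>
    rw [List.foldl_cons, ih, ← PySem.Set.update_map_eq_foldl_add, List.flatMap_cons,
        PySem.Set.update_append]

-- filtering distributes out of a flatMap
theorem flatMap_filter {α β : Type} (l : List α) (g : α → List β) (p : β → Bool) :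
    (l.flatMap fun a => (g a).filter p) = (l.flatMap g).filter p := by
  induction l with
  | nil => rfl
  | cons a l ih => rw [List.flatMap_cons, List.flatMap_cons, List.filter_append, ih]

-- the lefts loop builds [s[k:st], s[k+1:st], …, s[st:st]]
theorem lefts_fold (os : String) (st : Int) (hst : st ≤ (os.toList.length : Int)) :
    ∀ (m : Nat) (k : Int), 0 ≤ k → k + m = st →
    ((PySem.List.pyRange k st).reverse).foldl
      (fun lefts k' =>
        (PySem.Str.slice os (some k') (some (k'+1)) ++ lefts.headD "") :: lefts)
      [""]
    = (PySem.List.pyRange k (st + 1)).map (fun i => PySem.Str.slice os (some i) (some st)) := by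
  intro m
  induction m with
  | zero =>
    intro k hk0 hke
    have hk : k = st := by omega
    subst hk
    rw [PySem.List.pyRange_one_eq_nil le_rfl, PySem.List.pyRange_one_cons (by omega),
        PySem.List.pyRange_one_eq_nil le_rfl]
    simp [slice_refl_empty os k (by omega)]
  | succ m ih =>
    intro k hk0 hke
    have hklt : k < st := by omega
    rw [PySem.List.pyRange_one_cons hklt, List.reverse_cons, List.foldl_append,
        ih (k+1) (by omega) (by omega)]
    rw [PySem.List.pyRange_one_cons (by omega : k < st + 1)]
    rw [PySem.List.pyRange_one_cons (by omega : k + 1 < st + 1)]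
    simp only [List.map_cons, List.foldl_cons, List.foldl_nil, List.headD_cons]
    congr 1
    exact slice_split2 os k (k+1) st (by omega) (by omega) (by omega)

-- the inner growth loop emits exactly the filtered slices s[i:j+1], …, s[i:n]
theorem inner_loop (os sub : String) (i : Int) (hi : 0 ≤ i) :
    ∀ (m : Nat) (j : Int) (out : List String), i ≤ j → j + m = (os.toList.length : Int) →
    ((PySem.List.pyRange j (os.toList.length : Int)).foldl
      (fun st k =>
        (st.1 ++ PySem.Str.slice os (some k) (some (k+1)),
         if st.1 ++ PySem.Str.slice os (some k) (some (k+1)) = sub then st.2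
         else st.2 ++ [st.1 ++ PySem.Str.slice os (some k) (some (k+1))]))
      (PySem.Str.slice os (some i) (some j), out)).2
    = out ++ ((PySem.List.pyRange (j+1) ((os.toList.length : Int) + 1)).map
        (fun j2 => PySem.Str.slice os (some i) (some j2))).filter (fun t => !(t == sub)) := by
  intro m
  induction m with
  | zero =>
    intro j out hij hje
    have hj : j = (os.toList.length : Int) := by omega
    subst hj
    rw [PySem.List.pyRange_one_eq_nil le_rfl, PySem.List.pyRange_one_eq_nil (by omega)]
    simp
  | succ m ih =>
    intro j out hij hje
    have hjlt : j < (os.toList.length : Int) := by omega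
    rw [PySem.List.pyRange_one_cons hjlt, List.foldl_cons]
    have hsnoc : PySem.Str.slice os (some i) (some j) ++ PySem.Str.slice os (some j) (some (j+1))
        = PySem.Str.slice os (some i) (some (j+1)) :=
      slice_split2 os i j (j+1) hi hij (by omega)
    rw [hsnoc, ih (j+1) _ (by omega) (by omega)]
    rw [PySem.List.pyRange_one_cons (by omega : j + 1 < (os.toList.length : Int) + 1),
        List.map_cons, List.filter_cons]
    by_cases ht : PySem.Str.slice os (some i) (some (j+1)) = sub
    · simp [ht]
    · simp [ht, List.append_assoc]

-- A's outer step in normal form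
theorem a_step (os : String) (acc : PySem.Set String) (sub : String) :
    (let startPos : Int := PySem.Str.find os sub
     let stopPos : Int := startPos + PySem.Str.len sub
     let bigs : PySem.Set String :=
       (PySem.List.pyRange 0 (startPos + 1)).foldl (fun bigs i =>
         (PySem.List.pyRange stopPos (PySem.Str.len os + 1)).foldl (fun bigs j =>
           PySem.Set.add bigs (PySem.Str.slice os (some i) (some j))) bigs)
         PySem.Set.empty
     let bigs := PySem.Set.discard bigs sub
     PySem.Set.union acc bigs)
    = PySem.Set.update acc (contrib os sub) := by
  show PySem.Set.update acc _ = _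
  rw [foldl_add_nested]
  rw [show (PySem.Set.empty : PySem.Set String) = [] from rfl]
  rw [PySem.Set.update_nil_left, update_discard_ofList]
  rfl

-- facts about a successful find: the match is literally sub, and it fits inside os
theorem find_facts (os sub : String) (h : 0 ≤ PySem.Str.find os sub) :
    PySem.Str.slice os (some (PySem.Str.find os sub))
      (some (PySem.Str.find os sub + PySem.Str.len sub)) = sub
    ∧ PySem.Str.find os sub + PySem.Str.len sub ≤ (os.toList.length : Int) := by
  rw [PySem.Str.find_eq] at *
  have hspec := (PySem.Chars.find_spec h).1
  have hlen2 : sub.toList.length + (PySem.Chars.find os.toList sub.toList).toNat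
      ≤ os.toList.length := by
    have hle := hspec.length_le
    have hub := PySem.Chars.find_le_length os.toList sub.toList
    simp only [List.length_drop] at hle
    omega
  constructor
  · apply String.ext
    simp only [PySem.Str.toList_slice, PySem.Chars.slice_eq_listSlice, PySem.Str.len_eq]
    rw [PySem.List.slice_toNat _ h (by positivity)]
    have htn : ((PySem.Chars.find os.toList sub.toList) + (sub.toList.length : Int)).toNat
        - (PySem.Chars.find os.toList sub.toList).toNat = sub.toList.length := by omega
    rw [htn]
    exact (List.prefix_iff_eq_take.mp hspec).symm
  · rw [PySem.Str.len_eq]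
    omega

-- B's outer step in normal form
theorem b_step (os : String) (out : List String) (sub : String) :
    (let startPos : Int := PySem.Str.find os sub
     if startPos < 0 then out
     else
       let stopPos : Int := startPos + PySem.Str.len sub
       let lefts : List String :=
         (PySem.List.pyRange 0 startPos).reverse.foldl
           (fun lefts k =>
             (PySem.Str.slice os (some k) (some (k+1)) ++ lefts.headD "") :: lefts)
           [""]
       lefts.foldl (fun out left =>
         let t := left ++ sub
         let out := if t = sub then out else out ++ [t]
         ((PySem.List.pyRange stopPos (PySem.Str.len os)).foldl
           (fun st k =>
             let t := st.1 ++ PySem.Str.slice os (some k) (some (k+1))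
             (t, if t = sub then st.2 else st.2 ++ [t]))
           (t, out)).2) out)
    = out ++ contrib os sub := by
  by_cases hneg : PySem.Str.find os sub < 0
  · rw [if_pos hneg]
    have hnil : PySem.List.pyRange 0 (PySem.Str.find os sub + 1) = [] :=
      PySem.List.pyRange_one_eq_nil (by omega)
    simp only [contrib, candList, hnil, List.flatMap_nil, List.filter_nil, List.append_nil]
  · rw [if_neg hneg]
    have h0 : 0 ≤ PySem.Str.find os sub := by omega
    obtain ⟨hmid, hsp⟩ := find_facts os sub h0
    set st : Int := PySem.Str.find os sub with hstdef
    set sp : Int := st + PySem.Str.len sub with hspdef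
    have hlen0 : (0:Int) ≤ PySem.Str.len sub := by
      rw [PySem.Str.len_eq]; positivity
    have hstle : st ≤ (os.toList.length : Int) := by omega
    -- rewrite Str.len os to the cast length
    rw [show PySem.Str.len os = (os.toList.length : Int) from PySem.Str.len_eq os]
    -- lefts
    rw [lefts_fold os st hstle st.toNat 0 le_rfl (by omega)]
    rw [List.foldl_map]
    -- each i contributes its filtered row
    rw [PySem.List.foldl_congr_mem _ _
      (fun out i => out ++ ((PySem.List.pyRange (sp) ((os.toList.length : Int) + 1)).map
        (fun j => PySem.Str.slice os (some i) (some j))).filter (fun t => !(t == sub))) _ ?rows]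
    case rows =>
      intro acc i hi
      obtain ⟨hi0, hi1⟩ := PySem.List.mem_pyRange_one.mp hi
      have hist : i ≤ st := by omega
      have hrow : PySem.Str.slice os (some i) (some st) ++ sub
          = PySem.Str.slice os (some i) (some sp) := by
        rw [← hmid]
        exact slice_split2 os i st sp hi0 hist (by omega)
      show (_ : (String × List String)).2 = _
      simp only [hrow]
      rw [inner_loop os sub i hi0 ((os.toList.length : Int) - sp).toNat sp _ (by omega) (by omega)]
      rw [PySem.List.pyRange_one_cons (by omega : sp < (os.toList.length : Int) + 1),
          List.map_cons, List.filter_cons]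
      by_cases ht : PySem.Str.slice os (some i) (some sp) = sub
      · simp [ht]
      · simp [ht, List.append_assoc]
    rw [PySem.List.foldl_append_eq_flatMap]
    congr 1
    rw [flatMap_filter]
    have hsp2 : st + (sub.toList.length : Int) = sp := by
      rw [hspdef, PySem.Str.len_eq]
    simp only [contrib, candList, ← hstdef, PySem.Str.len_eq, hsp2]

-- accumulating updates = dedup of the accumulated stream
theorem fold_update_ofList (os : String) (subs : List String) :
    ∀ (out : List String),
    subs.foldl (fun acc sub => PySem.Set.update acc (contrib os sub)) (PySem.Set.ofList out)
    = PySem.Set.ofList (subs.foldl (fun o s => o ++ contrib os s) out) := by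
  induction subs with
  | nil => intro out; rfl
  | cons x subs ih =>
    intro out
    rw [List.foldl_cons, List.foldl_cons, ← PySem.Set.ofList_append, ih]

-- ===== VERDICT (by name: the statement is the Claim_ definition above) =====
theorem get_biggs_spec : Claim_equal_get_biggs := by
  intro subs os _
  show get_biggs subs os = get_biggs_alt subs os
  have ha : get_biggs subs os
      = subs.foldl (fun acc sub => PySem.Set.update acc (contrib os sub)) PySem.Set.empty := by
    unfold get_biggs
    exact congrFun (congrFun (congrArg List.foldl
      (funext fun acc => funext fun sub => a_step os acc sub)) PySem.Set.empty) subs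
  have hb : get_biggs_alt subs os
      = PySem.Set.ofList (subs.foldl (fun o s => o ++ contrib os s) []) := by
    unfold get_biggs_alt
    exact congrArg PySem.Set.ofList (congrFun (congrFun (congrArg List.foldl
      (funext fun out => funext fun sub => b_step os out sub)) []) subs)
  rw [ha, hb]
  exact fold_update_ofList os subs []
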